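-- pv_equiv track=rewrite | github.com/algorithm-study-NKD/algorithm-study | 4일차/길웅/더맵게.py | solution
-- ===== SOURCE A (Python) =====
-- import heapq
--
-- def solution(scoville, K):
--     heapq.heapify(scoville)
--
--     answer = 0
--
--     while True:
--         k1 = heapq.heappop(scoville)
--
--         if k1 >= K:
--             break
--
--         if len(scoville) == 0:
--             answer = -1
--             break
--
--         k2 = heapq.heappop(scoville)
--
--         heapq.heappush(scoville, k1 + 2 * k2)
--         answer += 1
--
--     return answer
-- ===== SOURCE B (Python) =====
-- def solution(scoville, K):
--     s = sorted(scoville)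
--     answer = 0
--     while True:
--         k1 = s.pop(0)
--         if k1 >= K:
--             break
--         if len(s) == 0:
--             answer = -1
--             break
--         k2 = s.pop(0)
--         v = k1 + 2 * k2
--         pos = 0
--         while pos < len(s) and s[pos] < v:
--             pos += 1
--         s.insert(pos, v)
--         answer += 1
--     return answer
-- ===== Notes on version B (the rewrite author's own statement) =====
-- stated objective: simpler
-- what changed: Replaces the binary heap with an explicitly maintained sorted list: sort once, pop the two smallest from the front, reinsert the mix by a linear sorted insertion; drops the heapq dependency.
import Mathlib
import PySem

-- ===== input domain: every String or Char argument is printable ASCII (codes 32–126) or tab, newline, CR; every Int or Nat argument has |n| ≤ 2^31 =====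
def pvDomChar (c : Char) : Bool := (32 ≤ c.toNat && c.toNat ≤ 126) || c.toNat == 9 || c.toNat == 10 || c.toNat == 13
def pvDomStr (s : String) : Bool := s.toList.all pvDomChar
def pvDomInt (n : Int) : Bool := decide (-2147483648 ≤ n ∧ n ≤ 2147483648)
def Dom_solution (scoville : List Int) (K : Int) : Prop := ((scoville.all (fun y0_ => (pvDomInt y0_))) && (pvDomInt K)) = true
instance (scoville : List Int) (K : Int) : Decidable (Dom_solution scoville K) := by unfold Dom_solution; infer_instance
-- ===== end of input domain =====

-- B replaces the heap by a maintained sorted list (no heapq); same return value.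
-- NOTE: Python A mutates `scoville` in place (heapify/pops); B sorts a copy. The
-- equivalence proved here is about the RETURN value only.

-- ===== PORT A =====
-- heapq calls are ported by their multiset contract (no PySem heapq primitive):
-- heappop = remove and return the minimum element, heappush = add an element,
-- heapify = reorder in place (no effect on the multiset, hence none on the result).
-- This is exact for the returned value, which depends only on the multiset.
def pyHeapPop? (h : List Int) : Option (Int × List Int) :=
  match PySem.List.min? h (fun x => x) with
  | none => none                     -- heappop of an empty heap: IndexError
  | some m => some (m, h.erase m)

theorem pyHeapPop?_length {h : List Int} {m : Int} {t : List Int}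
    (hp : pyHeapPop? h = some (m, t)) : t.length + 1 = h.length := by
  unfold pyHeapPop? at hp
  cases hmin : PySem.List.min? h (fun x => x) with
  | none => rw [hmin] at hp; cases hp
  | some m0 =>
    rw [hmin] at hp
    injection hp with h2
    injection h2 with he1 he2
    subst he2
    have hm : m0 ∈ h := PySem.List.min?_mem hmin
    have := List.length_erase_of_mem hm
    have hpos : 0 < h.length := List.length_pos_of_mem hm
    omega

def solutionLoop (heap : List Int) (K : Int) (answer : Int) : Int :=
  match hp : pyHeapPop? heap with
  | none => answer                   -- Python raises here; reachable only from scoville = [] (outside Pre_)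
  | some (k1, h1) =>
    if k1 ≥ K then answer
    else if h1.length = 0 then -1
    else
      match hp2 : pyHeapPop? h1 with
      | none => -1                   -- unreachable: h1 ≠ []
      | some (k2, h2) => solutionLoop (h2 ++ [k1 + 2 * k2]) K (answer + 1)
termination_by heap.length
decreasing_by
  have h1len := pyHeapPop?_length hp
  have h2len := pyHeapPop?_length hp2
  simp only [List.length_append, List.length_cons, List.length_nil]
  omega

def solution (scoville : List Int) (K : Int) : Int :=
  solutionLoop scoville K 0          -- heapify leaves the multiset unchanged

-- ===== PORT B =====
-- the linear scan `while pos < len(s) and s[pos] < v` + insert at pos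
def insSorted (v : Int) : List Int → List Int
  | [] => [v]
  | x :: xs => if x < v then x :: insSorted v xs else v :: x :: xs

theorem length_insSorted (v : Int) (l : List Int) :
    (insSorted v l).length = l.length + 1 := by
  induction l with
  | nil => rfl
  | cons x xs ih => simp only [insSorted]; split <;> simp [ih]

def solutionAltLoop (s : List Int) (K : Int) (answer : Int) : Int :=
  match s with
  | [] => answer                     -- s.pop(0) raises here; reachable only from scoville = [] (outside Pre_)
  | k1 :: rest =>
    if k1 ≥ K then answer
    else
      match rest with
      | [] => -1
      | k2 :: rest2 => solutionAltLoop (insSorted (k1 + 2 * k2) rest2) K (answer + 1)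
termination_by s.length
decreasing_by
  simp [length_insSorted]

def solution_alt (scoville : List Int) (K : Int) : Int :=
  solutionAltLoop (PySem.List.sorted scoville (fun x => x) false) K 0

-- ===== PRECONDITION & SPEC =====
-- Pre_ excludes exactly the empty list, on which Python A raises IndexError (first heappop).
def Pre_solution (scoville : List Int) (K : Int) : Prop := scoville ≠ []
instance (scoville : List Int) (K : Int) : Decidable (Pre_solution scoville K) := by unfold Pre_solution; infer_instance
def pvWitness_solution : List Int × Int := ([1, 2, 3, 9, 10, 12], 7)

def Spec_solution (scoville : List Int) (K : Int) (out : Int) : Prop := out = solution_alt scoville K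
instance (scoville : List Int) (K : Int) (out : Int) : Decidable (Spec_solution scoville K out) := by unfold Spec_solution; infer_instance

-- ===== CLAIM (what is proved, stated in full; the proofs are below) =====
def Claim_equal_solution : Prop := ∀ (scoville : List Int) (K : Int), Dom_solution scoville K → Pre_solution scoville K → Spec_solution scoville K (solution scoville K)

-- ===== LEMMAS AND PROOFS =====

theorem perm_insSorted (v : Int) (l : List Int) : (insSorted v l).Perm (v :: l) := by
  induction l with
  | nil => rfl
  | cons x xs ih =>
    simp only [insSorted]
    split
    · exact (ih.cons x).trans (List.Perm.swap v x xs)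
    · rfl

theorem pairwise_insSorted (v : Int) (l : List Int)
    (hl : l.Pairwise (· ≤ ·)) : (insSorted v l).Pairwise (· ≤ ·) := by
  induction l with
  | nil => simp [insSorted]
  | cons x xs ih =>
    rw [List.pairwise_cons] at hl
    simp only [insSorted]
    split
    · rename_i hxv
      rw [List.pairwise_cons]
      refine ⟨fun y hy => ?_, ih hl.2⟩
      rcases List.mem_cons.mp (((perm_insSorted v xs).mem_iff).mp hy) with rfl | hy
      · exact le_of_lt hxv
      · exact hl.1 y hy
    · rename_i hxv
      rw [List.pairwise_cons]
      exact ⟨fun y hy => by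
        rcases List.mem_cons.mp hy with rfl | hy
        · omega
        · exact le_trans (by omega) (hl.1 y hy), List.pairwise_cons.mpr hl⟩

-- popping the heap minimum = taking the head of a sorted permutation
theorem pyHeapPop?_of_perm_sorted {h : List Int} {k : Int} {rest : List Int}
    (hperm : h.Perm (k :: rest)) (hsort : (k :: rest).Pairwise (· ≤ ·)) :
    ∃ t, pyHeapPop? h = some (k, t) ∧ t.Perm rest := by
  have hne : h ≠ [] := by
    intro rfl; exact (List.cons_ne_nil k rest) (List.Perm.nil_eq hperm).symm
  cases hmin : PySem.List.min? h (fun x => x) with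
  | none =>
    cases h with
    | nil => exact absurd rfl hne
    | cons a as => rw [PySem.List.min?_id_cons] at hmin; cases hmin
  | some m =>
    have hm : m ∈ h := PySem.List.min?_mem hmin
    have hmin' := PySem.List.min?_isMin hmin
    have hkh : k ∈ h := hperm.mem_iff.mpr (by simp)
    have h1 : m ≤ k := hmin' k hkh
    have h2 : k ≤ m := by
      have hms : m ∈ k :: rest := hperm.mem_iff.mp hm
      rcases hms with _ | hms
      · exact le_refl _
      · exact (List.pairwise_cons.mp hsort).1 m (by assumption)
    have hkm : m = k := le_antisymm h1 h2
    subst hkm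
    refine ⟨h.erase m, by simp [pyHeapPop?, hmin], ?_⟩
    have := hperm.erase m
    simpa using this

theorem loop_eq (n : Nat) : ∀ (heap s : List Int) (K ans : Int),
    heap.length = n → heap.Perm s → s.Pairwise (· ≤ ·) →
    solutionLoop heap K ans = solutionAltLoop s K ans := by
  induction n using Nat.strong_induction_on with
  | _ n ih =>
    intro heap s K ans hlen hperm hsort
    cases s with
    | nil =>
      have : heap = [] := List.Perm.eq_nil hperm
      subst this
      simp [solutionLoop, solutionAltLoop, pyHeapPop?, PySem.List.min?]
    | cons k1 rest =>
      obtain ⟨t, hpop, htperm⟩ := pyHeapPop?_of_perm_sorted hperm hsort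
      rw [solutionLoop.eq_def, solutionAltLoop.eq_def]
      split
      · rename_i heq
        rw [heq] at hpop; cases hpop
      · rename_i k1' h1 heq
        rw [heq] at hpop
        injection hpop with hpair
        have he1 : k1' = k1 := congrArg Prod.fst hpair
        have he2 : h1 = t := congrArg Prod.snd hpair
        subst he1; subst he2
        by_cases hk1 : K ≤ k1'
        · rw [if_pos hk1]; simp [hk1]
        · rw [if_neg hk1]
          simp only [ge_iff_le, hk1, if_false]
          cases rest with
          | nil =>
            have ht : h1 = [] := List.Perm.eq_nil htperm
            subst ht
            simp
          | cons k2 rest2 =>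
            have htne : h1.length ≠ 0 := by
              rw [htperm.length_eq]; simp
            rw [if_neg htne]
            have hrsort : (k2 :: rest2).Pairwise (· ≤ ·) :=
              (List.pairwise_cons.mp hsort).2
            obtain ⟨t2, hpop2, ht2perm⟩ := pyHeapPop?_of_perm_sorted htperm hrsort
            split
            · rename_i heq2
              rw [heq2] at hpop2; cases hpop2
            · rename_i k2' h2 heq2
              rw [heq2] at hpop2
              injection hpop2 with hpair2
              have hf1 : k2' = k2 := congrArg Prod.fst hpair2
              have hf2 : h2 = t2 := congrArg Prod.snd hpair2
              subst hf1; subst hf2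
              have hlen1 := pyHeapPop?_length heq
              have hnewperm : (h2 ++ [k1' + 2 * k2']).Perm (insSorted (k1' + 2 * k2') rest2) := by
                have hh1 : (h2 ++ [k1' + 2 * k2']).Perm ((k1' + 2 * k2') :: h2) :=
                  List.perm_append_singleton _ _
                have hh2 : ((k1' + 2 * k2') :: h2).Perm ((k1' + 2 * k2') :: rest2) :=
                  ht2perm.cons _
                exact (hh1.trans hh2).trans (perm_insSorted _ _).symm
              have hnewsort : (insSorted (k1' + 2 * k2') rest2).Pairwise (· ≤ ·) :=
                pairwise_insSorted _ _ (List.pairwise_cons.mp hrsort).2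
              have hlen2 := pyHeapPop?_length heq2
              exact ih (h2 ++ [k1' + 2 * k2']).length (by simp; omega)
                (h2 ++ [k1' + 2 * k2']) _ K (ans + 1) rfl hnewperm hnewsort

-- ===== VERDICT (by name: the statement is the Claim_ definition above) =====
theorem solution_spec : Claim_equal_solution := by
  intro scoville K _hdom _hpre
  unfold Spec_solution solution solution_alt
  exact loop_eq scoville.length scoville _ K 0 rfl
    (PySem.List.sorted_perm scoville (fun x => x) false).symm
    (PySem.List.sorted_pairwise scoville (fun x => x))
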